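-- pv_equiv track=rewrite | github.com/dtg01100/dbutils | src/dbutils/utils.py | _word_prefix_or_edit
-- ===== SOURCE A (Python) =====
-- def edit_distance(s1: str, s2: str) -> int:
--     """Compute Levenshtein edit distance between two strings.
--     Returns the minimum number of edits needed to transform s1 into s2.
--     """
--     if len(s1) < len(s2):
--         return edit_distance(s2, s1)
--
--     if len(s2) == 0:
--         return len(s1)
--
--     # Use single array instead of two arrays to reduce memory operations
--     # This is more cache-friendly and reduces allocation/deallocation overhead
--     previous_row = list(range(len(s2) + 1))
--     current_row = [0] * (len(s2) + 1)
--
--     for i, c1 in enumerate(s1):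
--         current_row[0] = i + 1
--         for j, c2 in enumerate(s2):
--             # Calculate all values inline to avoid min() function call overhead
--             insertions = previous_row[j + 1] + 1
--             deletions = current_row[j] + 1
--             substitutions = previous_row[j] + (c1 != c2)
--
--             # Inline min calculation since we only have 3 values
--             if insertions <= deletions and insertions <= substitutions:
--                 min_val = insertions
--             elif deletions <= substitutions:
--                 min_val = deletions
--             else:
--                 min_val = substitutions
--
--             current_row[j + 1] = min_val
--
--         # Swap arrays instead of copying - more efficient
--         previous_row, current_row = current_row, previous_row
--
--     return previous_row[-1]
--
-- def _word_prefix_or_edit(text_lower: str, query_lower: str) -> bool: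
--     # Use a more efficient method to split and avoid creating intermediate strings unnecessarily
--     # Process text to handle both underscores and spaces as word separators
--     text_processed = text_lower.replace("_", " ")
--     words = text_processed.split()
--
--     for word in words:
--         # Fast prefix check
--         if word.startswith(query_lower):
--             return True
--         # Only compute edit distance for potentially similar words
--         # Check length first to avoid expensive edit distance calculation
--         if len(query_lower) >= 3 and abs(len(word) - len(query_lower)) <= 2:
--             # Calculate max distance once
--             max_distance = max(1, len(query_lower) // 3)
--             # Use the length check to potentially avoid edit distance calculation
--             if abs(len(word) - len(query_lower)) <= max_distance:
--                 if edit_distance(word, query_lower) <= max_distance: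
--                     return True
--     return False
-- ===== SOURCE B (Python) =====
-- def _lev(s1: str, s2: str) -> int:
--     """Levenshtein distance via top-down recursion with memoization on the
--     prefix-length pair (i, j)."""
--     memo = [[-1] * (len(s2) + 1) for _ in range(len(s1) + 1)]
--
--     def go(i: int, j: int) -> int:
--         r = memo[i][j]
--         if r >= 0:
--             return r
--         if i == 0:
--             r = j
--         elif j == 0:
--             r = i
--         elif s1[i - 1] == s2[j - 1]:
--             r = go(i - 1, j - 1)
--         else:
--             r = 1 + min(go(i - 1, j - 1), go(i - 1, j), go(i, j - 1))
--         memo[i][j] = r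
--         return r
--
--     return go(len(s1), len(s2))
--
--
-- def _word_prefix_or_edit(text_lower: str, query_lower: str) -> bool:
--     q = query_lower
--     gate = len(q) >= 3
--     max_distance = max(1, len(q) // 3)
--     return any(
--         w.startswith(q)
--         or (gate
--             and abs(len(w) - len(q)) <= min(2, max_distance)
--             and _lev(w, q) <= max_distance)
--         for w in text_lower.replace("_", " ").split()
--     )
-- ===== Notes on version B (the rewrite author's own statement) =====
-- stated objective: alternative
-- what changed: edit_distance's bottom-up rolling-array DP (with its argument swap) is replaced by a top-down memoized recursion on the prefix-length pair (i,j), and the wrapper's early-return loop with two chained length checks becomes a single any(...) over the words with the two length gates collapsed into abs(len(w)-len(q)) <= min(2, max(1, len(q)//3)).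
import Mathlib
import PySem

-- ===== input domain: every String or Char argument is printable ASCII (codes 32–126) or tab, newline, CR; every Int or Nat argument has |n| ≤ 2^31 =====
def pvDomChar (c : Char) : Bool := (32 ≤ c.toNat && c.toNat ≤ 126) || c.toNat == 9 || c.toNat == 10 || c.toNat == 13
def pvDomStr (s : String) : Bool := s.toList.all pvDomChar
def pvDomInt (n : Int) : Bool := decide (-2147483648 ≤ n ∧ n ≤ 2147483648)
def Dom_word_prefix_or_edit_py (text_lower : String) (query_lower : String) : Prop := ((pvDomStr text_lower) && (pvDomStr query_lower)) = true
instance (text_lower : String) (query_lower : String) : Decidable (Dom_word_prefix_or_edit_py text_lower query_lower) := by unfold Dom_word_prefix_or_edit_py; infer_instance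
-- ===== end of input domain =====

-- B replaces A's bottom-up rolling-array edit-distance DP by a top-down recursion on the
-- prefix-length pair and collapses the wrapper's early-return loop into a single `any`
-- with the two length gates merged (objective: alternative, same asymptotic cost).

-- ===== PORT A =====

-- inner `for j, c2 in enumerate(s2)` loop of edit_distance: `cur` is current_row[0..j]
-- (every written cell; the pre-allocated cells beyond j are overwritten before they are read)
def pvEdInner (c1 : Char) (prev : List Int) : List (Int × Char) → List Int → List Int
  | [], cur => cur
  | (j, c2) :: rest, cur =>
    let insertions := (PySem.List.pyGet? prev (j + 1)).getD 0 + 1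
    let deletions := (PySem.List.pyGet? cur j).getD 0 + 1
    let substitutions := (PySem.List.pyGet? prev j).getD 0 + (if c1 ≠ c2 then 1 else 0)
    let minVal :=
      if insertions ≤ deletions ∧ insertions ≤ substitutions then insertions
      else if deletions ≤ substitutions then deletions
      else substitutions
    pvEdInner c1 prev rest (cur ++ [minVal])

-- outer `for i, c1 in enumerate(s1)` loop: after each row the (swapped) current row becomes prev
def pvEdOuter (t : List Char) : List (Int × Char) → List Int → List Int
  | [], prev => prev
  | (i, c1) :: rest, prev =>
    pvEdOuter t rest (pvEdInner c1 prev (PySem.List.enumerate t 0) [i + 1])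

-- body of edit_distance after the argument swap (the Python function recurses at most once,
-- immediately, to put the longer string first; the swap is done by pvEditDistance below)
def pvEdCore (s1 s2 : String) : Int :=
  if PySem.Str.len s2 = 0 then PySem.Str.len s1
  else
    (PySem.List.pyGet?
      (pvEdOuter s2.toList (PySem.List.enumerate s1.toList 0)
        (PySem.List.pyRange 0 (PySem.Str.len s2 + 1) 1)) (-1)).getD 0

def pvEditDistance (s1 s2 : String) : Int :=
  if PySem.Str.len s1 < PySem.Str.len s2 then pvEdCore s2 s1 else pvEdCore s1 s2

-- the `for word in words` loop of _word_prefix_or_edit, with its early returns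
def pvWordLoopA (q : String) : List String → Bool
  | [] => false
  | w :: ws =>
    if PySem.Str.startswith w q then true
    else if 3 ≤ PySem.Str.len q ∧ |PySem.Str.len w - PySem.Str.len q| ≤ 2 then
      -- max_distance = max(1, len(query_lower) // 3)
      if |PySem.Str.len w - PySem.Str.len q| ≤ max 1 (PySem.Int.floordiv (PySem.Str.len q) 3)
          ∧ pvEditDistance w q ≤ max 1 (PySem.Int.floordiv (PySem.Str.len q) 3)
      then true
      else pvWordLoopA q ws
    else pvWordLoopA q ws

def word_prefix_or_edit_py (text_lower : String) (query_lower : String) : Bool :=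
  pvWordLoopA query_lower (PySem.Str.split₀ (PySem.Str.replace text_lower "_" " "))

-- ===== PORT B =====

-- Source B's `go(i, j)`: edit distance of the length-i prefix of s and the length-j prefix of t
-- (the Python memo cache only avoids recomputation; the computed values are these)
def pvLevGo (s t : List Char) : Nat → Nat → Nat
  | 0, j => j
  | i + 1, 0 => i + 1
  | i + 1, j + 1 =>
    if s.getD i ' ' = t.getD j ' ' then pvLevGo s t i j
    else 1 + min (pvLevGo s t i j) (min (pvLevGo s t i (j + 1)) (pvLevGo s t (i + 1) j))

def pvLev (s1 s2 : String) : Int :=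
  (pvLevGo s1.toList s2.toList s1.toList.length s2.toList.length : Int)

def word_prefix_or_edit_py_alt (text_lower : String) (query_lower : String) : Bool :=
  -- gate = len(q) >= 3;  max_distance = max(1, len(q) // 3)
  (PySem.Str.split₀ (PySem.Str.replace text_lower "_" " ")).any fun w =>
    PySem.Str.startswith w query_lower ||
      (decide (3 ≤ PySem.Str.len query_lower)
        && decide (|PySem.Str.len w - PySem.Str.len query_lower| ≤
            min 2 (max 1 (PySem.Int.floordiv (PySem.Str.len query_lower) 3)))
        && decide (pvLev w query_lower ≤ max 1 (PySem.Int.floordiv (PySem.Str.len query_lower) 3)))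

-- ===== PRECONDITION & SPEC =====
def Spec_word_prefix_or_edit_py (text_lower : String) (query_lower : String) (out : Bool) : Prop := out = word_prefix_or_edit_py_alt text_lower query_lower
instance (text_lower : String) (query_lower : String) (out : Bool) : Decidable (Spec_word_prefix_or_edit_py text_lower query_lower out) := by unfold Spec_word_prefix_or_edit_py; infer_instance

-- ===== CLAIM (what is proved, stated in full; the proofs are below) =====
def Claim_equal_word_prefix_or_edit_py : Prop := ∀ (text_lower : String) (query_lower : String), Dom_word_prefix_or_edit_py text_lower query_lower → Spec_word_prefix_or_edit_py text_lower query_lower (word_prefix_or_edit_py text_lower query_lower)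

-- ===== LEMMAS AND PROOFS =====

theorem pvLevGo_zero_right (s t : List Char) (i : Nat) : pvLevGo s t i 0 = i := by
  cases i <;> simp [pvLevGo]

theorem pvLevGo_ge (s t : List Char) (i : Nat) :
    ∀ j, i ≤ pvLevGo s t i j + j ∧ j ≤ pvLevGo s t i j + i := by
  induction i with
  | zero => intro j; simp [pvLevGo]
  | succ i ih =>
    intro j
    induction j with
    | zero => simp [pvLevGo]
    | succ j ihj =>
      have h1 := ih j
      have h2 := ih (j + 1)
      simp only [pvLevGo]
      split_ifs <;> omega

theorem pvLevGo_swap (s t : List Char) (i : Nat) :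
    ∀ j, pvLevGo s t i j = pvLevGo t s j i := by
  induction i with
  | zero => intro j; simp [pvLevGo, pvLevGo_zero_right]
  | succ i ih =>
    intro j
    induction j with
    | zero => simp [pvLevGo, pvLevGo_zero_right]
    | succ j ihj =>
      have h1 := ih j
      have h2 := ih (j + 1)
      by_cases h : s.getD i ' ' = t.getD j ' '
      · simp only [pvLevGo, if_pos h, if_pos h.symm, h1]
      · have h' : ¬ t.getD j ' ' = s.getD i ' ' := fun e => h e.symm
        simp only [pvLevGo, if_neg h, if_neg h', h1, h2, ihj]
        omega

theorem pvLevGo_adj (N : Nat) : ∀ (s t : List Char) (i j : Nat), i + j ≤ N →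
    pvLevGo s t i (j + 1) ≤ pvLevGo s t i j + 1 ∧
    pvLevGo s t i j ≤ pvLevGo s t i (j + 1) + 1 := by
  induction N with
  | zero =>
    intro s t i j h
    have hi : i = 0 := by omega
    have hj : j = 0 := by omega
    subst hi; subst hj; simp [pvLevGo]
  | succ N ih =>
    intro s t i j h
    match i, j with
    | 0, j => simp [pvLevGo]; omega
    | i + 1, 0 =>
      have hg := (pvLevGo_ge s t i 1).1
      simp only [pvLevGo, pvLevGo_zero_right, Nat.zero_add]
      split_ifs <;> omega
    | i + 1, j + 1 =>
      have F1 := ih s t i j (by omega)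
      have F2 := ih s t i (j + 1) (by omega)
      have F3 := ih t s j i (by omega)
      rw [← pvLevGo_swap s t (i + 1) j, ← pvLevGo_swap s t i j] at F3
      simp only [pvLevGo]
      split_ifs <;> omega

theorem pvLevGo_adj_col (s t : List Char) (i j : Nat) :
    pvLevGo s t i (j + 1) ≤ pvLevGo s t i j + 1 ∧
    pvLevGo s t i j ≤ pvLevGo s t i (j + 1) + 1 :=
  pvLevGo_adj (i + j) s t i j (le_refl _)

theorem pvLevGo_adj_row (s t : List Char) (i j : Nat) :
    pvLevGo s t (i + 1) j ≤ pvLevGo s t i j + 1 ∧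
    pvLevGo s t i j ≤ pvLevGo s t (i + 1) j + 1 := by
  have h := pvLevGo_adj_col t s j i
  rw [← pvLevGo_swap s t (i + 1) j, ← pvLevGo_swap s t i j] at h
  exact h

theorem pvLevGo_step (s t : List Char) (i j : Nat) :
    pvLevGo s t (i + 1) (j + 1) =
      min (pvLevGo s t i (j + 1) + 1)
        (min (pvLevGo s t (i + 1) j + 1)
          (pvLevGo s t i j + (if s.getD i ' ' = t.getD j ' ' then 0 else 1))) := by
  have hc := pvLevGo_adj_col s t i j
  have hr := pvLevGo_adj_row s t i j
  simp only [pvLevGo]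
  split_ifs <;> omega

-- the full row after i processed characters of s: prefix distances pvLevGo s t i ·
def pvRow (s t : List Char) (i : Nat) (len : Nat) : List Int :=
  (List.range len).map (fun j => (pvLevGo s t i j : Int))

theorem pvRow_get (s t : List Char) (i len k : Nat) (hk : k < len) :
    PySem.List.pyGet? (pvRow s t i len) (k : Int) = some ((pvLevGo s t i k : Int)) := by
  rw [PySem.List.pyGet?_natCast]
  simp [pvRow, hk]

theorem pvEdInner_inv (s t : List Char) (i : Nat) :
    ∀ (rest : List Char) (k : Nat), rest = t.drop k → k ≤ t.length →
      pvEdInner (s.getD i ' ') (pvRow s t i (t.length + 1))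
        (PySem.List.enumerate rest (k : Int)) (pvRow s t (i + 1) (k + 1))
      = pvRow s t (i + 1) (t.length + 1) := by
  intro rest
  induction rest with
  | nil =>
    intro k hrest hk
    have : t.length ≤ k := by
      have := congrArg List.length hrest
      simp [List.length_drop] at this
      omega
    have hkk : k = t.length := by omega
    subst hkk
    simp [pvEdInner, PySem.List.enumerate]
  | cons c rest ih =>
    intro k hrest hk
    have hklt : k < t.length := by
      have := congrArg List.length hrest
      simp [List.length_drop] at this
      omega
    have hc : c = t.getD k ' ' := by
      have h1 : (t.drop k).head? = some c := by rw [← hrest]; rfl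
      have h2 : (t.drop k).head? = t[k]? := by
        rw [List.head?_drop]
      rw [h2] at h1
      simp [List.getElem?_eq_getElem hklt] at h1
      simp [List.getD, List.getElem?_eq_getElem hklt, h1]
    have hrest' : rest = t.drop (k + 1) := by
      have h2 := congrArg (List.drop 1) hrest.symm
      have h3 : List.drop (k + 1) t = rest := by
        simpa [List.drop_drop, Nat.add_comm] using h2
      exact h3.symm
    rw [PySem.List.enumerate_cons]
    simp only [pvEdInner]
    have g1 : PySem.List.pyGet? (pvRow s t i (t.length + 1)) ((k : Int) + 1)
        = some ((pvLevGo s t i (k + 1) : Int)) := by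
      have : ((k : Int) + 1) = ((k + 1 : Nat) : Int) := by push_cast; ring
      rw [this, pvRow_get s t i _ (k + 1) (by omega)]
    have g2 : PySem.List.pyGet? (pvRow s t (i + 1) (k + 1)) ((k : Int))
        = some ((pvLevGo s t (i + 1) k : Int)) :=
      pvRow_get s t (i + 1) _ k (by omega)
    have g3 : PySem.List.pyGet? (pvRow s t i (t.length + 1)) ((k : Int))
        = some ((pvLevGo s t i k : Int)) :=
      pvRow_get s t i _ k (by omega)
    rw [g1, g2, g3]
    have hmin :
        (if (pvLevGo s t i (k + 1) : Int) + 1 ≤ (pvLevGo s t (i + 1) k : Int) + 1 ∧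
            (pvLevGo s t i (k + 1) : Int) + 1 ≤ (pvLevGo s t i k : Int) + (if s.getD i ' ' ≠ c then 1 else 0)
         then (pvLevGo s t i (k + 1) : Int) + 1
         else if (pvLevGo s t (i + 1) k : Int) + 1 ≤ (pvLevGo s t i k : Int) + (if s.getD i ' ' ≠ c then 1 else 0)
         then (pvLevGo s t (i + 1) k : Int) + 1
         else (pvLevGo s t i k : Int) + (if s.getD i ' ' ≠ c then 1 else 0))
        = (pvLevGo s t (i + 1) (k + 1) : Int) := by
      rw [pvLevGo_step s t i k, hc]
      by_cases h : s.getD i ' ' = t.getD k ' ' <;> simp only [h, if_pos, if_neg, ne_eq, not_true_eq_false, not_false_eq_true] <;> split_ifs <;> push_cast <;> omega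
    simp only [Option.getD_some]
    rw [hmin]
    have hrow : pvRow s t (i + 1) (k + 1) ++ [(pvLevGo s t (i + 1) (k + 1) : Int)]
        = pvRow s t (i + 1) (k + 2) := by
      simp [pvRow, List.range_succ]
    rw [hrow]
    have := ih (k + 1) hrest' (by omega)
    simpa using this
  
theorem pvEdOuter_inv (s t : List Char) :
    ∀ (rest : List Char) (i : Nat), rest = s.drop i → i ≤ s.length →
      pvEdOuter t (PySem.List.enumerate rest (i : Int)) (pvRow s t i (t.length + 1))
      = pvRow s t s.length (t.length + 1) := by
  intro rest
  induction rest with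
  | nil =>
    intro i hrest hi
    have : s.length ≤ i := by
      have := congrArg List.length hrest
      simp [List.length_drop] at this
      omega
    have hii : i = s.length := by omega
    subst hii
    simp [pvEdOuter, PySem.List.enumerate]
  | cons c rest ih =>
    intro i hrest hi
    have hilt : i < s.length := by
      have := congrArg List.length hrest
      simp [List.length_drop] at this
      omega
    have hc : c = s.getD i ' ' := by
      have h1 : (s.drop i).head? = some c := by rw [← hrest]; rfl
      rw [List.head?_drop] at h1
      simp [List.getElem?_eq_getElem hilt] at h1
      simp [List.getD, List.getElem?_eq_getElem hilt, h1]
    have hrest' : rest = s.drop (i + 1) := by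
      have h2 := congrArg (List.drop 1) hrest.symm
      have h3 : List.drop (i + 1) s = rest := by
        simpa [List.drop_drop, Nat.add_comm] using h2
      exact h3.symm
    rw [PySem.List.enumerate_cons]
    simp only [pvEdOuter]
    have hstart : [(i : Int) + 1] = pvRow s t (i + 1) 1 := by
      simp [pvRow, List.range_succ, pvLevGo_zero_right]
    rw [hstart, hc]
    have hin := pvEdInner_inv s t i t 0 (by simp) (by omega)
    simp only [Nat.cast_zero, Nat.zero_add] at hin
    rw [hin]
    have : ((i : Int) + 1) = ((i + 1 : Nat) : Int) := by push_cast; ring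
    rw [this, ih (i + 1) hrest' (by omega)]

theorem pvEdCore_eq (s1 s2 : String) :
    pvEdCore s1 s2 = (pvLevGo s1.toList s2.toList s1.toList.length s2.toList.length : Int) := by
  unfold pvEdCore
  by_cases h : PySem.Str.len s2 = 0
  · rw [if_pos h]
    have h2 : s2.toList.length = 0 := by
      have := PySem.Str.len_eq s2
      omega
    simp [PySem.Str.len_eq, h2, pvLevGo_zero_right]
  · rw [if_neg h]
    have hlen : PySem.Str.len s2 + 1 = ((s2.toList.length + 1 : Nat) : Int) := by
      rw [PySem.Str.len_eq]; push_cast; ring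
    have hinit : PySem.List.pyRange 0 (PySem.Str.len s2 + 1) 1 = pvRow s1.toList s2.toList 0 (s2.toList.length + 1) := by
      rw [hlen]
      rw [PySem.List.pyRange_zero_natCast]
      simp [pvRow, pvLevGo]
    rw [hinit]
    have h0 : ((0 : Nat) : Int) = (0 : Int) := by norm_num
    have := pvEdOuter_inv s1.toList s2.toList s1.toList 0 (by simp) (by omega)
    rw [h0] at this
    rw [this]
    -- final[-1] on a row of length len(s2)+1 is the entry at index len(s2)
    have hneg : PySem.List.pyGet? (pvRow s1.toList s2.toList s1.toList.length (s2.toList.length + 1)) (-1)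
        = some ((pvLevGo s1.toList s2.toList s1.toList.length s2.toList.length : Int)) := by
      simp [PySem.List.pyGet?, PySem.List.pyIdx?, pvRow]
    rw [hneg]
    rfl

theorem pvEditDistance_eq (w q : String) : pvEditDistance w q = pvLev w q := by
  unfold pvEditDistance pvLev
  by_cases h : PySem.Str.len w < PySem.Str.len q
  · rw [if_pos h, pvEdCore_eq, pvLevGo_swap]
  · rw [if_neg h, pvEdCore_eq]

theorem pvWordLoopA_eq (q : String) (ws : List String) :
    pvWordLoopA q ws =
      ws.any (fun w =>
        PySem.Str.startswith w q ||
          (decide (3 ≤ PySem.Str.len q)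
            && decide (|PySem.Str.len w - PySem.Str.len q| ≤ min 2 (max 1 (PySem.Int.floordiv (PySem.Str.len q) 3)))
            && decide (pvLev w q ≤ max 1 (PySem.Int.floordiv (PySem.Str.len q) 3)))) := by
  induction ws with
  | nil => rfl
  | cons w ws ih =>
    rw [List.any_cons, ← ih]
    simp only [pvWordLoopA]
    by_cases hsw : PySem.Str.startswith w q = true
    · rw [if_pos hsw, hsw]; exact (Bool.true_or _).symm
    · have hsw' : PySem.Str.startswith w q = false := by
        revert hsw; cases PySem.Str.startswith w q <;> simp
      rw [if_neg hsw, hsw', Bool.false_or, pvEditDistance_eq]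
      have hhead : ∀ (r : Bool),
          (if 3 ≤ PySem.Str.len q ∧ |PySem.Str.len w - PySem.Str.len q| ≤ 2 then
            if |PySem.Str.len w - PySem.Str.len q| ≤ max 1 (PySem.Int.floordiv (PySem.Str.len q) 3)
                ∧ pvLev w q ≤ max 1 (PySem.Int.floordiv (PySem.Str.len q) 3)
            then true else r
          else r)
          = ((decide (3 ≤ PySem.Str.len q)
              && decide (|PySem.Str.len w - PySem.Str.len q| ≤ min 2 (max 1 (PySem.Int.floordiv (PySem.Str.len q) 3)))
              && decide (pvLev w q ≤ max 1 (PySem.Int.floordiv (PySem.Str.len q) 3))) || r) := by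
        intro r
        by_cases h1 : 3 ≤ PySem.Str.len q ∧ |PySem.Str.len w - PySem.Str.len q| ≤ 2
        · rw [if_pos h1]
          by_cases h2 : |PySem.Str.len w - PySem.Str.len q| ≤ max 1 (PySem.Int.floordiv (PySem.Str.len q) 3)
              ∧ pvLev w q ≤ max 1 (PySem.Int.floordiv (PySem.Str.len q) 3)
          · rw [if_pos h2]
            have hb : (decide (3 ≤ PySem.Str.len q)
                && decide (|PySem.Str.len w - PySem.Str.len q| ≤ min 2 (max 1 (PySem.Int.floordiv (PySem.Str.len q) 3)))
                && decide (pvLev w q ≤ max 1 (PySem.Int.floordiv (PySem.Str.len q) 3))) = true := by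
              simp only [Bool.and_eq_true, decide_eq_true_eq]
              exact ⟨⟨h1.1, by omega⟩, h2.2⟩
            rw [hb, Bool.true_or]
          · rw [if_neg h2]
            have hb : (decide (3 ≤ PySem.Str.len q)
                && decide (|PySem.Str.len w - PySem.Str.len q| ≤ min 2 (max 1 (PySem.Int.floordiv (PySem.Str.len q) 3)))
                && decide (pvLev w q ≤ max 1 (PySem.Int.floordiv (PySem.Str.len q) 3))) = false := by
              by_cases hA : |PySem.Str.len w - PySem.Str.len q| ≤ min 2 (max 1 (PySem.Int.floordiv (PySem.Str.len q) 3))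
              · have hB : ¬ pvLev w q ≤ max 1 (PySem.Int.floordiv (PySem.Str.len q) 3) := by
                  intro hb2; exact h2 ⟨by omega, hb2⟩
                simp only [decide_eq_false hB, Bool.and_false]
              · simp only [decide_eq_false hA, Bool.and_false, Bool.false_and]
            rw [hb, Bool.false_or]
        · rw [if_neg h1]
          have hb : (decide (3 ≤ PySem.Str.len q)
              && decide (|PySem.Str.len w - PySem.Str.len q| ≤ min 2 (max 1 (PySem.Int.floordiv (PySem.Str.len q) 3)))
              && decide (pvLev w q ≤ max 1 (PySem.Int.floordiv (PySem.Str.len q) 3))) = false := by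
            by_cases h3 : 3 ≤ PySem.Str.len q
            · have hA : ¬ |PySem.Str.len w - PySem.Str.len q| ≤ min 2 (max 1 (PySem.Int.floordiv (PySem.Str.len q) 3)) := by
                have hd2 : ¬ |PySem.Str.len w - PySem.Str.len q| ≤ 2 := fun hd => h1 ⟨h3, hd⟩
                omega
              simp only [decide_eq_false hA, Bool.and_false, Bool.false_and]
            · simp only [decide_eq_false h3, Bool.false_and]
          rw [hb, Bool.false_or]
      exact hhead (pvWordLoopA q ws)

-- ===== VERDICT (by name: the statement is the Claim_ definition above) =====
theorem word_prefix_or_edit_py_spec : Claim_equal_word_prefix_or_edit_py := by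
  intro text_lower query_lower _
  unfold Spec_word_prefix_or_edit_py word_prefix_or_edit_py word_prefix_or_edit_py_alt
  exact pvWordLoopA_eq query_lower _
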